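-- pv_equiv track=rewrite | github.com/tarkansarim/None_Z-image-Turbo_trainer_Plus | src/zimage_trainer/networks/lora.py | _convert_name_to_key
-- ===== SOURCE A (Python) =====
-- def _convert_name_to_key(name: str) -> str:
--     """Convert internal module name to proper key format.
--
--     Example: layers_0_attention_to_q -> layers.0.attention.to_q
--     """
--     parts = name.split('_')
--     result = []
--     i = 0
--     while i < len(parts):
--         part = parts[i]
--         # Numbers stay as-is
--         if part.isdigit():
--             result.append(part)
--         # to_q, to_k, to_v, to_out 保持为整体
--         elif part == 'to' and i+1 < len(parts) and parts[i+1] in ['q', 'k', 'v', 'out']: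
--             result.append(f'to_{parts[i+1]}')
--             i += 1
--         # Special multi-word tokens
--         elif part == 'adaLN' and i+1 < len(parts) and parts[i+1] == 'modulation':
--             result.append('adaLN_modulation')
--             i += 1
--         elif part == 'feed' and i+1 < len(parts) and parts[i+1] == 'forward':
--             result.append('feed_forward')
--             i += 1
--         elif part == 'noise' and i+1 < len(parts) and parts[i+1] == 'refiner':
--             result.append('noise_refiner')
--             i += 1
--         elif part == 'context' and i+1 < len(parts) and parts[i+1] == 'refiner':
--             result.append('context_refiner')
--             i += 1
--         else:
--             result.append(part)
--         i += 1
--     return '.'.join(result)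
-- ===== SOURCE B (Python) =====
-- _SPECIAL = {
--     ('to', 'q'), ('to', 'k'), ('to', 'v'), ('to', 'out'),
--     ('adaLN', 'modulation'), ('feed', 'forward'),
--     ('noise', 'refiner'), ('context', 'refiner'),
-- }
--
--
-- def _convert_name_to_key(name: str) -> str:
--     """Right-to-left pass: fuse a special (first, second) pair when the part
--     just read forms one with the current head of the rebuilt tail."""
--     merged = []
--     for part in reversed(name.split('_')):
--         if merged and (part, merged[0]) in _SPECIAL:
--             merged[0] = part + '_' + merged[0]
--         else:
--             merged.insert(0, part)
--     return '.'.join(merged)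
-- ===== Notes on version B (the rewrite author's own statement) =====
-- stated objective: alternative
-- what changed: Replaces the index-driven while-loop with its six-branch if/elif chain and manual i+=1 skip by a single right-to-left fold over the split parts that fuses a pair when it occurs in a declared table of special (first, second) tokens; no index arithmetic or lookahead, and digits need no special case.
import Mathlib
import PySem

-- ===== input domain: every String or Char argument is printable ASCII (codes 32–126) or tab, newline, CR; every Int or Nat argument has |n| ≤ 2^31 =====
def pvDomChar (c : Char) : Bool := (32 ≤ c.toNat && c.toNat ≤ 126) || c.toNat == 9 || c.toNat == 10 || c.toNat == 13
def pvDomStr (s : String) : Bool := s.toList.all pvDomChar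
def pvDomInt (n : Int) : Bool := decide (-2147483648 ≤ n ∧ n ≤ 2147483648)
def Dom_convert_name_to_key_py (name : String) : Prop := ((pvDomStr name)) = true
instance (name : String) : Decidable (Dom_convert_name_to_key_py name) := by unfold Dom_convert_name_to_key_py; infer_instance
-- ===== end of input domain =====

-- B rebuilds the split name by a right-to-left fold with a table of special pairs instead of
-- A's index-driven while-loop with a lookahead if/elif chain (objective: alternative decomposition).


-- ===== PORT A =====
-- A's while-loop over `parts` with index i (skipping one extra part after a merge) as the
-- obvious structural recursion on the remaining parts; branches in A's order.
def convAloop : List String → List String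
  | [] => []
  | [p] => if PySem.Str.strIsdigit p then [p] else [p]   -- last part: every lookahead test i+1<len fails
  | p :: q :: rest =>
    if PySem.Str.strIsdigit p then p :: convAloop (q :: rest)
    else if p = "to" && (q == "q" || q == "k" || q == "v" || q == "out") then
      ("to_" ++ q) :: convAloop rest
    else if p = "adaLN" && q == "modulation" then "adaLN_modulation" :: convAloop rest
    else if p = "feed" && q == "forward" then "feed_forward" :: convAloop rest
    else if p = "noise" && q == "refiner" then "noise_refiner" :: convAloop rest
    else if p = "context" && q == "refiner" then "context_refiner" :: convAloop rest
    else p :: convAloop (q :: rest)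

def convert_name_to_key_py (name : String) : String :=
  PySem.Str.join "." (convAloop ((PySem.Str.split? name "_").getD []))

-- ===== PORT B =====
def SPECIAL : List (String × String) :=
  [("to", "q"), ("to", "k"), ("to", "v"), ("to", "out"),
   ("adaLN", "modulation"), ("feed", "forward"),
   ("noise", "refiner"), ("context", "refiner")]

-- body of B's `for part in reversed(parts)` loop (a right fold over parts)
def convBstep (part : String) (acc : List String) : List String :=
  match acc with
  | q :: t => if (part, q) ∈ SPECIAL then (part ++ "_" ++ q) :: t else part :: q :: t
  | [] => [part]

def convert_name_to_key_py_alt (name : String) : String :=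
  PySem.Str.join "." (((PySem.Str.split? name "_").getD []).foldr convBstep [])

-- ===== PRECONDITION & SPEC =====
def Spec_convert_name_to_key_py (name : String) (out : String) : Prop := out = convert_name_to_key_py_alt name
instance (name : String) (out : String) : Decidable (Spec_convert_name_to_key_py name out) := by unfold Spec_convert_name_to_key_py; infer_instance

-- ===== CLAIM (what is proved, stated in full; the proofs are below) =====
def Claim_equal_convert_name_to_key_py : Prop := ∀ (name : String), Dom_convert_name_to_key_py name → Spec_convert_name_to_key_py name (convert_name_to_key_py name)

-- ===== LEMMAS AND PROOFS =====

-- first components of the special pairs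
def FIRSTS : List String := ["to", "adaLN", "feed", "noise", "context"]

-- the eight possible fused tokens B's loop can put at the head of its accumulator
def MERGED : List String :=
  ["to_q", "to_k", "to_v", "to_out", "adaLN_modulation", "feed_forward", "noise_refiner", "context_refiner"]

theorem mem_SPECIAL_first {p q : String} (h : (p, q) ∈ SPECIAL) : p ∈ FIRSTS := by
  simp [SPECIAL] at h
  rcases h with ⟨h1,_⟩|⟨h1,_⟩|⟨h1,_⟩|⟨h1,_⟩|⟨h1,_⟩|⟨h1,_⟩|⟨h1,_⟩|⟨h1,_⟩ <;> simp [h1, FIRSTS]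

-- a part that is not a first component of any special pair is just pushed by convBstep
theorem convBstep_not_first (p : String) (acc : List String) (h : p ∉ FIRSTS) :
    convBstep p acc = p :: acc := by
  cases acc with
  | nil => rfl
  | cons q t =>
    unfold convBstep
    have hns : (p, q) ∉ SPECIAL := fun hm => h (mem_SPECIAL_first hm)
    simp [hns]

-- the head of a B-fold over a nonempty list is either the first part or a fused token
theorem convB_head (q : String) (r : List String) :
    ∃ t, (q :: r).foldr convBstep [] = q :: t ∨
      ∃ m, (q :: r).foldr convBstep [] = m :: t ∧ m ∈ MERGED := by
  cases hr : r.foldr convBstep [] with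
  | nil => exact ⟨[], Or.inl (by simp [hr, convBstep])⟩
  | cons h t =>
    by_cases hs : (q, h) ∈ SPECIAL
    · refine ⟨t, Or.inr ⟨q ++ "_" ++ h, by simp [hr, convBstep, hs], ?_⟩⟩
      simp [SPECIAL] at hs
      rcases hs with ⟨h1,h2⟩|⟨h1,h2⟩|⟨h1,h2⟩|⟨h1,h2⟩|⟨h1,h2⟩|⟨h1,h2⟩|⟨h1,h2⟩|⟨h1,h2⟩ <;>
        simp [h1, h2, MERGED]
    · exact ⟨h :: t, Or.inl (by simp [hr, convBstep, hs])⟩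

-- core equivalence of the two loop bodies
theorem convA_eq_convB (xs : List String) : convAloop xs = xs.foldr convBstep [] := by
  induction xs using convAloop.induct with
  | case1 => rfl
  | case2 p hd => simp [convAloop, convBstep]
  | case3 p hd => simp [convAloop, convBstep]
  | case4 p q rest hdig ih =>
    -- p is all digits, hence not a first component of a special pair
    have hnf : p ∉ FIRSTS := by
      intro hm
      simp [FIRSTS] at hm
      rcases hm with h1|h1|h1|h1|h1 <;> (subst h1; exact absurd hdig (by decide))
    simp only [convAloop, hdig, if_pos, List.foldr_cons, ih]
    rw [convBstep_not_first p _ hnf]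
  | case5 p q rest hdig hc ih =>
    rcases Bool.and_eq_true_iff.mp hc with ⟨h1, h2⟩
    have hp : p = "to" := of_decide_eq_true h1
    have hq : q = "q" ∨ q = "k" ∨ q = "v" ∨ q = "out" := by
      rcases Bool.or_eq_true_iff.mp h2 with h|h
      · rcases Bool.or_eq_true_iff.mp h with h|h
        · rcases Bool.or_eq_true_iff.mp h with h|h
          · exact Or.inl (eq_of_beq h)
          · exact Or.inr (Or.inl (eq_of_beq h))
        · exact Or.inr (Or.inr (Or.inl (eq_of_beq h)))
      · exact Or.inr (Or.inr (Or.inr (eq_of_beq h)))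
    subst hp
    rcases hq with h|h|h|h <;> subst h <;> simp only [convAloop, List.foldr_cons, ih, hdig] <;>
      [rw [convBstep_not_first "q" _ (by decide)];
       rw [convBstep_not_first "k" _ (by decide)];
       rw [convBstep_not_first "v" _ (by decide)];
       rw [convBstep_not_first "out" _ (by decide)]] <;>
      simp [convBstep, SPECIAL]
  | case6 p q rest h0 h1 hc ih =>
    rcases Bool.and_eq_true_iff.mp hc with ⟨e1, e2⟩
    have hp : p = "adaLN" := of_decide_eq_true e1
    have hq : q = "modulation" := eq_of_beq e2
    subst hp; subst hq
    simp only [convAloop, List.foldr_cons, ih, h0]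
    rw [convBstep_not_first "modulation" _ (by decide)]
    simp [convBstep, SPECIAL]
  | case7 p q rest h0 h1 h2 hc ih =>
    rcases Bool.and_eq_true_iff.mp hc with ⟨e1, e2⟩
    have hp : p = "feed" := of_decide_eq_true e1
    have hq : q = "forward" := eq_of_beq e2
    subst hp; subst hq
    simp only [convAloop, List.foldr_cons, ih, h0]
    rw [convBstep_not_first "forward" _ (by decide)]
    simp [convBstep, SPECIAL]
  | case8 p q rest h0 h1 h2 h3 hc ih =>
    rcases Bool.and_eq_true_iff.mp hc with ⟨e1, e2⟩
    have hp : p = "noise" := of_decide_eq_true e1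
    have hq : q = "refiner" := eq_of_beq e2
    subst hp; subst hq
    simp only [convAloop, List.foldr_cons, ih, h0]
    rw [convBstep_not_first "refiner" _ (by decide)]
    simp [convBstep, SPECIAL]
  | case9 p q rest h0 h1 h2 h3 h4 hc ih =>
    rcases Bool.and_eq_true_iff.mp hc with ⟨e1, e2⟩
    have hp : p = "context" := of_decide_eq_true e1
    have hq : q = "refiner" := eq_of_beq e2
    subst hp; subst hq
    simp only [convAloop, List.foldr_cons, ih, h0]
    rw [convBstep_not_first "refiner" _ (by decide)]
    simp [convBstep, SPECIAL]
  | case10 p q rest h0 h1 h2 h3 h4 h5 ih =>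
    -- no branch fired: A pushes p; B's convBstep must push p as well
    have lhs : convAloop (p :: q :: rest) = p :: convAloop (q :: rest) := by
      simp only [convAloop]
      rw [if_neg h0, if_neg h1, if_neg h2, if_neg h3, if_neg h4, if_neg h5]
    rw [lhs, ih]
    conv_rhs => rw [List.foldr_cons]
    obtain ⟨t, hcase⟩ := convB_head q rest
    rcases hcase with hh | ⟨m, hh, hm⟩
    · -- head is q itself: (p, q) is not special, by the negated branch conditions
      have hns : (p, q) ∉ SPECIAL := by
        intro hmem
        simp [SPECIAL] at hmem
        rcases hmem with ⟨e1,e2⟩|⟨e1,e2⟩|⟨e1,e2⟩|⟨e1,e2⟩|⟨e1,e2⟩|⟨e1,e2⟩|⟨e1,e2⟩|⟨e1,e2⟩ <;>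
          (subst e1; subst e2; first
            | exact h1 (by decide) | exact h2 (by decide) | exact h3 (by decide)
            | exact h4 (by decide) | exact h5 (by decide))
      rw [hh]; simp [convBstep, hns]
    · -- head is a fused token: never a second component of a special pair
      have hns : (p, m) ∉ SPECIAL := by
        intro hmem
        simp [SPECIAL] at hmem
        simp [MERGED] at hm
        rcases hmem with ⟨_,e2⟩|⟨_,e2⟩|⟨_,e2⟩|⟨_,e2⟩|⟨_,e2⟩|⟨_,e2⟩|⟨_,e2⟩|⟨_,e2⟩ <;>
          (subst e2; rcases hm with h|h|h|h|h|h|h|h <;> exact absurd h (by decide))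
      rw [hh]; simp [convBstep, hns]

-- ===== VERDICT (by name: the statement is the Claim_ definition above) =====
theorem convert_name_to_key_py_spec : Claim_equal_convert_name_to_key_py := by
  intro name _
  unfold Spec_convert_name_to_key_py convert_name_to_key_py convert_name_to_key_py_alt
  rw [convA_eq_convB]
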